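-- pv_equiv track=rewrite | github.com/greenstar1151/Baekjoon | 9527_1의 개수 세기/9527_1의 개수 세기_251026.py | count_bin_ones_from_zero
-- ===== SOURCE A (Python) =====
-- def count_bin_ones_from_zero(n: int) -> int:
--     if n < 0:
--         return 0
--     magnitude = 1
--     one_count = 0
--     while n // magnitude > 0:
--         cycle = magnitude * 2
--         n_cycles = n // cycle
--         one_count += n_cycles * magnitude
--         is_phase_over_half = True if (n % cycle) >= magnitude else False
--         if is_phase_over_half:
--             one_count += (n % cycle) - magnitude + 1
--         magnitude *= 2
--
--     return one_count
-- ===== SOURCE B (Python) =====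
-- def count_bin_ones_from_zero(n: int) -> int:
--     # Recurse on the highest set bit: ones([0..n]) = ones below 2**k, plus the
--     # top bits of 2**k..n, plus ones([0..n-2**k]).
--     if n <= 0:
--         return 0
--     k = n.bit_length() - 1        # largest k with 2**k <= n
--     p = 2 ** k
--     return k * p // 2 + (n - p + 1) + count_bin_ones_from_zero(n - p)
-- ===== Notes on version B (the rewrite author's own statement) =====
-- stated objective: alternative
-- what changed: Replaces A's low-to-high per-bit accumulation loop (cycle counting for every bit position) by a recursion on the highest set bit: ones up to n = closed-form count below the highest power of two, plus the top bits of the remaining prefix, plus a recursive call on the remainder.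
import Mathlib
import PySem

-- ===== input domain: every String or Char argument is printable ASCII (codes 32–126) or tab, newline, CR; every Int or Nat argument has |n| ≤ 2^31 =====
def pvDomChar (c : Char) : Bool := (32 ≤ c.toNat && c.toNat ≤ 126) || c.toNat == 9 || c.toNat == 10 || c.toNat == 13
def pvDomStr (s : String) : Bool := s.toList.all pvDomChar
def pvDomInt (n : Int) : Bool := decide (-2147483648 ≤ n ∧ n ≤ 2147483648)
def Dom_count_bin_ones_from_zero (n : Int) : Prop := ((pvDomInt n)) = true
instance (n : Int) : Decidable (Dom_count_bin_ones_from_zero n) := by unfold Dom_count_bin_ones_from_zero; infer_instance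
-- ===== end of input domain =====

-- B replaces A's low-to-high per-bit cycle-counting loop by a recursion on the
-- highest set bit (alternative decomposition; no speed claim).

-- ===== PORT A =====
-- The while loop, with fuel: for n ≥ 0 it runs bit_length(n) ≤ n.toNat + 1 times,
-- so the fuel n.toNat + 1 supplied below never runs out on inputs A terminates on.
def count_bin_ones_from_zero_loop : Nat → Int → Int → Int → Int
  | 0, _, _, one_count => one_count
  | fuel + 1, n, magnitude, one_count =>
    if PySem.Int.floordiv n magnitude > 0 then
      let cycle := magnitude * 2
      let n_cycles := PySem.Int.floordiv n cycle
      let one_count := one_count + n_cycles * magnitude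
      let is_phase_over_half : Bool := if PySem.Int.mod n cycle ≥ magnitude then true else false
      let one_count := if is_phase_over_half then one_count + (PySem.Int.mod n cycle - magnitude + 1) else one_count
      count_bin_ones_from_zero_loop fuel n (magnitude * 2) one_count
    else one_count

def count_bin_ones_from_zero (n : Int) : Int :=
  if n < 0 then 0
  else count_bin_ones_from_zero_loop (n.toNat + 1) n 1 0

-- ===== PORT B =====
def count_bin_ones_from_zero_alt (n : Int) : Int :=
  if n ≤ 0 then 0
  else
    let k : Nat := PySem.Int.bitLength n - 1
    let p : Int := 2 ^ k
    PySem.Int.floordiv ((k : Int) * p) 2 + (n - p + 1) + count_bin_ones_from_zero_alt (n - p)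
termination_by n.toNat
decreasing_by
  have h3 : (0 : Int) < 2 ^ (PySem.Int.bitLength n - 1) := pow_pos (by norm_num) _
  omega

-- ===== PRECONDITION & SPEC =====
def Spec_count_bin_ones_from_zero (n : Int) (out : Int) : Prop := out = count_bin_ones_from_zero_alt n
instance (n : Int) (out : Int) : Decidable (Spec_count_bin_ones_from_zero n out) := by unfold Spec_count_bin_ones_from_zero; infer_instance

-- ===== CLAIM (what is proved, stated in full; the proofs are below) =====
def Claim_equal_count_bin_ones_from_zero : Prop := ∀ (n : Int), Dom_count_bin_ones_from_zero n → Spec_count_bin_ones_from_zero n (count_bin_ones_from_zero n)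

-- ===== LEMMAS AND PROOFS =====

-- popcount of a nonnegative integer
def pvPc (v : Int) : Int :=
  if 0 < v then v % 2 + pvPc (v / 2) else 0
termination_by v.toNat
decreasing_by omega

-- running total of popcounts: pvS n = Σ_{i=0}^{n} pvPc i (0 for n < 0)
def pvS (n : Int) : Int :=
  if 0 < n then pvS (n - 1) + pvPc n else 0
termination_by n.toNat
decreasing_by omega

-- one summand of A's loop (count of ones at bit position "magnitude" m among 0..n)
def pvG (n m : Int) : Int :=
  PySem.Int.floordiv n (m * 2) * m +
    (if PySem.Int.mod n (m * 2) ≥ m then PySem.Int.mod n (m * 2) - m + 1 else 0)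

lemma pvPc_nonpos {v : Int} (h : v ≤ 0) : pvPc v = 0 := by
  rw [pvPc]; simp [show ¬ 0 < v by omega]

lemma pvPc_pos {v : Int} (h : 0 < v) : pvPc v = v % 2 + pvPc (v / 2) := by
  rw [pvPc]; simp [h]

lemma pv_halved (n : Int) (hn : 0 ≤ n) : pvPc n = n % 2 + pvPc (n / 2) := by
  by_cases h : 0 < n
  · exact pvPc_pos h
  · have h0 : n = 0 := by omega
    subst h0
    simp [pvPc_nonpos]

lemma pvS_nonpos {n : Int} (h : n ≤ 0) : pvS n = 0 := by
  rw [pvS]; simp [show ¬ 0 < n by omega]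

lemma pvS_pos {n : Int} (h : 0 < n) : pvS n = pvS (n - 1) + pvPc n := by
  rw [pvS]; simp [h]

lemma pvG_eq (n m : Int) (hm : 0 < m) :
    pvG n m = n / (m * 2) * m + (if n % (m * 2) ≥ m then n % (m * 2) - m + 1 else 0) := by
  unfold pvG
  rw [PySem.Int.floordiv_eq_ediv_of_pos (by omega), PySem.Int.mod_eq_emod_of_pos (by omega)]

lemma pvG_zero {n m : Int} (hm : 0 < m) (h0 : 0 ≤ n) (h : n < m) : pvG n m = 0 := by
  rw [pvG_eq n m hm]
  rw [Int.ediv_eq_zero_of_lt h0 (by omega), Int.emod_eq_of_lt h0 (by omega)]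
  simp [show ¬ n ≥ m by omega]

-- A's loop computes the sum of pvG over the magnitudes it visits
lemma pv_loop_sum : ∀ (K fuel : Nat) (n mag acc : Int), 0 ≤ n → 0 < mag →
    n < mag * 2 ^ K → K ≤ fuel →
    count_bin_ones_from_zero_loop fuel n mag acc =
      acc + ∑ k ∈ Finset.range K, pvG n (mag * 2 ^ k) := by
  intro K
  induction K with
  | zero =>
    intro fuel n mag acc h0 hm hlt _
    simp only [pow_zero, mul_one] at hlt
    have hdiv : PySem.Int.floordiv n mag = 0 := by
      rw [PySem.Int.floordiv_eq_ediv_of_pos hm]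
      exact Int.ediv_eq_zero_of_lt h0 hlt
    cases fuel with
    | zero => simp [count_bin_ones_from_zero_loop]
    | succ f => simp [count_bin_ones_from_zero_loop, hdiv]
  | succ K ih =>
    intro fuel n mag acc h0 hm hlt hfuel
    obtain ⟨f, rfl⟩ : ∃ f, fuel = f + 1 := ⟨fuel - 1, by omega⟩
    by_cases hc : PySem.Int.floordiv n mag > 0
    · rw [count_bin_ones_from_zero_loop]
      simp only [hc, if_true]
      have hsum : ∑ k ∈ Finset.range (K + 1), pvG n (mag * 2 ^ k)
          = pvG n mag + ∑ k ∈ Finset.range K, pvG n ((mag * 2) * 2 ^ k) := by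
        rw [Finset.sum_range_succ']
        rw [Finset.sum_congr rfl (fun k _ => by rw [show mag * 2 ^ (k + 1) = mag * 2 * 2 ^ k by ring])]
        rw [pow_zero, mul_one, add_comm]
      by_cases hph : PySem.Int.mod n (mag * 2) ≥ mag
      · simp only [hph, if_true]
        rw [ih f n (mag * 2) _ h0 (by omega) (by rw [pow_succ] at hlt; linarith) (by omega)]
        rw [hsum]
        simp [pvG, hph]
        ring
      · simp only [hph, if_false]
        rw [ih f n (mag * 2) _ h0 (by omega) (by rw [pow_succ] at hlt; linarith) (by omega)]
        rw [hsum]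
        simp [pvG, hph]
        ring
    · have hnm : n < mag := by
        by_contra hge
        have : 1 ≤ PySem.Int.floordiv n mag := by
          rw [PySem.Int.le_floordiv_iff_mul_le (by omega)]; omega
        omega
      rw [count_bin_ones_from_zero_loop]
      simp only [hc, if_false]
      have : ∀ k ∈ Finset.range (K + 1), pvG n (mag * 2 ^ k) = 0 := by
        intro k _
        have h2 : (1:Int) ≤ 2 ^ k := one_le_pow₀ (by norm_num)
        exact pvG_zero (by positivity) h0 (by nlinarith)
      rw [Finset.sum_eq_zero this, add_zero]

-- difference of adjacent per-bit counts is the bit indicator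
lemma pvG_diff (n m : Int) (hm : 0 < m) (hn : 1 ≤ n) :
    pvG n m - pvG (n - 1) m = if n % (m * 2) ≥ m then 1 else 0 := by
  rw [pvG_eq n m hm, pvG_eq (n - 1) m hm]
  set c := m * 2 with hc
  have hcpos : 0 < c := by omega
  have hqr : c * (n / c) + n % c = n := Int.ediv_add_emod n c
  have hr0 : 0 ≤ n % c := Int.emod_nonneg n (by omega)
  have hrc : n % c < c := Int.emod_lt_of_pos n hcpos
  by_cases h1 : 1 ≤ n % c
  · have key : n - 1 = (n % c - 1) + (n / c) * c := by linear_combination (-1 : Int) * hqr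
    have hdiv : (n - 1) / c = n / c := by
      rw [key, Int.add_mul_ediv_right _ _ (by omega : c ≠ 0),
        Int.ediv_eq_zero_of_lt (by omega) (by omega), zero_add]
    have hmod : (n - 1) % c = n % c - 1 := by
      rw [key, Int.add_mul_emod_self_right, Int.emod_eq_of_lt (by omega) (by omega)]
    rw [hdiv, hmod]
    have hcancel : ∀ X Y : Int, n / c * m + X - (n / c * m + Y) = X - Y := fun X Y => by ring
    rw [hcancel]
    split_ifs <;> omega
  · have hr : n % c = 0 := by omega
    have key : n - 1 = (c - 1) + (n / c - 1) * c := by linear_combination (-1 : Int) * hqr + hr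
    have hdiv : (n - 1) / c = n / c - 1 := by
      rw [key, Int.add_mul_ediv_right _ _ (by omega : c ≠ 0),
        Int.ediv_eq_zero_of_lt (by omega) (by omega), zero_add]
    have hmod : (n - 1) % c = c - 1 := by
      rw [key, Int.add_mul_emod_self_right, Int.emod_eq_of_lt (by omega) (by omega)]
    rw [hdiv, hmod, hr]
    rw [if_neg (by omega), if_pos (by omega : c - 1 ≥ m), if_neg (by omega)]
    have : n / c * m + 0 - ((n / c - 1) * m + (c - 1 - m + 1)) = m * 2 - c := by ring
    rw [this]; omega

-- bit k+1 of n is bit k of n/2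
lemma pv_bit_shift (n p : Int) (hp : 0 < p) (hn : 0 ≤ n) :
    (n % (p * 2 * 2) ≥ p * 2) ↔ ((n / 2) % (p * 2) ≥ p) := by
  have h2 : (2:Int) * (n / 2) + n % 2 = n := Int.ediv_add_emod n 2
  have hb0 : 0 ≤ n % 2 := Int.emod_nonneg n (by omega)
  have hb1 : n % 2 < 2 := Int.emod_lt_of_pos n (by omega)
  have hq : (p * 2) * ((n / 2) / (p * 2)) + (n / 2) % (p * 2) = n / 2 := Int.ediv_add_emod _ _
  have hr0 : 0 ≤ (n / 2) % (p * 2) := Int.emod_nonneg _ (by omega)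
  have hrc : (n / 2) % (p * 2) < p * 2 := Int.emod_lt_of_pos _ (by omega)
  have key : n = (2 * ((n / 2) % (p * 2)) + n % 2) + ((n / 2) / (p * 2)) * (p * 2 * 2) := by
    linear_combination (-1 : Int) * h2 - 2 * hq
  have hmod : n % (p * 2 * 2) = 2 * ((n / 2) % (p * 2)) + n % 2 := by
    conv_lhs => rw [key]
    rw [Int.add_mul_emod_self_right, Int.emod_eq_of_lt (by omega) (by omega)]
  rw [hmod]; omega

-- summing the bit indicators gives the popcount
lemma pv_sum_ind : ∀ (K : Nat) (n : Int), 0 ≤ n → n < 2 ^ K →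
    (∑ k ∈ Finset.range K, if n % (2 ^ k * 2) ≥ 2 ^ k then (1 : Int) else 0) = pvPc n := by
  intro K
  induction K with
  | zero =>
    intro n h0 h1
    have : n = 0 := by omega
    subst this
    simp [pvPc_nonpos]
  | succ K ih =>
    intro n h0 h1
    rw [Finset.sum_range_succ']
    have hterm : ∀ k, (if n % (2 ^ (k + 1) * 2) ≥ 2 ^ (k + 1) then (1:Int) else 0)
        = (if (n / 2) % (2 ^ k * 2) ≥ 2 ^ k then (1:Int) else 0) := by
      intro k
      have hsh := pv_bit_shift n (2 ^ k) (by positivity) h0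
      have hpow : (2:Int) ^ (k + 1) = 2 ^ k * 2 := by ring
      rw [hpow]
      by_cases hc : (n / 2) % (2 ^ k * 2) ≥ 2 ^ k
      · rw [if_pos (hsh.mpr hc), if_pos hc]
      · rw [if_neg (fun hh => hc (hsh.mp hh)), if_neg hc]
    rw [Finset.sum_congr rfl (fun k _ => hterm k)]
    have hhalf : n / 2 < 2 ^ K := by
      have : (2:Int) ^ (K + 1) = 2 ^ K * 2 := by ring
      rw [this] at h1
      omega
    rw [ih (n / 2) (by omega) hhalf]
    have hbit0 : (if n % (2 ^ 0 * 2) ≥ 2 ^ 0 then (1:Int) else 0) = n % 2 := by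
      norm_num
      omega
    rw [hbit0, pv_halved n h0]
    ring

lemma pv_sum_diff (n : Int) (hn : 1 ≤ n) (h32 : n < 2 ^ 32) :
    (∑ k ∈ Finset.range 32, pvG n (2 ^ k)) - (∑ k ∈ Finset.range 32, pvG (n - 1) (2 ^ k)) = pvPc n := by
  rw [← Finset.sum_sub_distrib]
  rw [Finset.sum_congr rfl (fun k _ => pvG_diff n (2 ^ k) (by positivity) hn)]
  exact pv_sum_ind 32 n (by omega) h32

lemma pvA_eq_sum (n : Int) (h0 : 0 ≤ n) (h31 : n ≤ 2 ^ 31) :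
    count_bin_ones_from_zero n = ∑ k ∈ Finset.range 32, pvG n (2 ^ k) := by
  rw [count_bin_ones_from_zero, if_neg (by omega)]
  have hsz : n.toNat < 2 ^ n.toNat.size := Nat.lt_size_self n.toNat
  have hK : n < 1 * 2 ^ n.toNat.size := by
    rw [one_mul]
    calc n = (n.toNat : Int) := by omega
    _ < ((2 ^ n.toNat.size : Nat) : Int) := by exact_mod_cast hsz
    _ = 2 ^ n.toNat.size := by push_cast; ring
  have hfuel : n.toNat.size ≤ n.toNat + 1 :=
    Nat.size_le.mpr (lt_of_lt_of_le Nat.lt_two_pow_self (Nat.pow_le_pow_right (by norm_num) (by omega)))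
  rw [pv_loop_sum n.toNat.size (n.toNat + 1) n 1 0 h0 one_pos hK hfuel, zero_add]
  rw [Finset.sum_congr rfl (fun k _ => by rw [one_mul])]
  have hsz32 : n.toNat.size ≤ 32 := Nat.size_le.mpr (by omega)
  refine Finset.sum_subset (Finset.range_subset_range.mpr hsz32) ?_
  intro x _ hx
  have hxs : n.toNat.size ≤ x := by
    simp only [Finset.mem_range, not_lt] at hx
    exact hx
  have hnx : n < 2 ^ x := by
    calc n = (n.toNat : Int) := by omega
    _ < ((2 ^ n.toNat.size : Nat) : Int) := by exact_mod_cast hsz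
    _ ≤ ((2 ^ x : Nat) : Int) := by exact_mod_cast Nat.pow_le_pow_right (by norm_num) hxs
    _ = 2 ^ x := by push_cast; ring
  exact pvG_zero (by positivity) h0 hnx

lemma pvA_eq_S : ∀ (N : Nat) (n : Int), n.toNat ≤ N → 0 ≤ n → n ≤ 2 ^ 31 →
    count_bin_ones_from_zero n = pvS n := by
  intro N
  induction N with
  | zero =>
    intro n hN h0 _
    have : n = 0 := by omega
    subst this
    rw [pvS_nonpos le_rfl]
    decide
  | succ N ih =>
    intro n hN h0 h31
    by_cases hpos : 0 < n
    · have hdiff := pv_sum_diff n (by omega) (by omega)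
      rw [pvA_eq_sum n h0 h31]
      have : (∑ k ∈ Finset.range 32, pvG n (2 ^ k))
          = (∑ k ∈ Finset.range 32, pvG (n - 1) (2 ^ k)) + pvPc n := by omega
      rw [this, ← pvA_eq_sum (n - 1) (by omega) (by omega),
        ih (n - 1) (by omega) (by omega) (by omega), ← pvS_pos hpos]
    · have : n = 0 := by omega
      subst this
      rw [pvS_nonpos le_rfl]
      decide

lemma pvPc_pow_add : ∀ (k : Nat) (i : Int), 0 ≤ i → i < 2 ^ k → pvPc (2 ^ k + i) = 1 + pvPc i := by
  intro k
  induction k with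
  | zero =>
    intro i h0 h1
    have : i = 0 := by omega
    subst this
    norm_num [pvPc_pos, pvPc_nonpos]
  | succ k ih =>
    intro i h0 h1
    have hpow : (2:Int) ^ (k + 1) = 2 ^ k * 2 := by ring
    have hppos : (0:Int) < 2 ^ k := by positivity
    rw [pvPc_pos (by positivity : 0 < 2 ^ (k + 1) + i)]
    have hmod : (2 ^ (k + 1) + i) % 2 = i % 2 := by
      rw [hpow]; omega
    have hdiv : (2 ^ (k + 1) + i) / 2 = 2 ^ k + i / 2 := by
      rw [hpow]; omega
    rw [hmod, hdiv, ih (i / 2) (by omega) (by rw [hpow] at h1; omega)]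
    rw [pv_halved i h0]
    ring

lemma pvS_split (k : Nat) : ∀ (N : Nat) (j : Int), j.toNat ≤ N → 0 ≤ j → j < 2 ^ k →
    pvS (2 ^ k + j) = pvS (2 ^ k - 1) + (j + 1) + pvS j := by
  intro N
  induction N with
  | zero =>
    intro j hN h0 h1
    have : j = 0 := by omega
    subst this
    have hppos : (0:Int) < 2 ^ k := by positivity
    rw [add_zero, pvS_pos hppos,
      show pvPc (2 ^ k) = pvPc (2 ^ k + 0) by norm_num,
      pvPc_pow_add k 0 le_rfl hppos]
    rw [pvS_nonpos (le_refl 0), pvPc_nonpos (le_refl 0)]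
    ring
  | succ N ih =>
    intro j hN h0 h1
    by_cases hj : j = 0
    · exact ih j (by omega) h0 h1
    · have hppos : (0:Int) < 2 ^ k := by positivity
      rw [pvS_pos (by omega : 0 < 2 ^ k + j)]
      have : 2 ^ k + j - 1 = 2 ^ k + (j - 1) := by ring
      rw [this, ih (j - 1) (by omega) (by omega) (by omega)]
      rw [pvPc_pow_add k j h0 h1]
      rw [pvS_pos (by omega : 0 < j)]
      ring

lemma pvS_pow (k : Nat) : 2 * pvS (2 ^ k - 1) = (k : Int) * 2 ^ k := by
  induction k with
  | zero => simp [pvS_nonpos]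
  | succ k ih =>
    have hppos : (0:Int) < 2 ^ k := by positivity
    have : (2:Int) ^ (k + 1) - 1 = 2 ^ k + (2 ^ k - 1) := by ring
    rw [this, pvS_split k ((2:Int) ^ k - 1).toNat (2 ^ k - 1) le_rfl (by omega) (by omega)]
    push_cast
    linear_combination (2 + (k:Int)) * pow_succ (2:Int) k + 2 * ih

lemma pvB_eq_S : ∀ (N : Nat) (n : Int), n.toNat ≤ N → 0 ≤ n →
    count_bin_ones_from_zero_alt n = pvS n := by
  intro N
  induction N with
  | zero =>
    intro n hN h0
    have : n = 0 := by omega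
    subst this
    rw [count_bin_ones_from_zero_alt, pvS_nonpos le_rfl]
    simp
  | succ N ih =>
    intro n hN h0
    by_cases hpos : 0 < n
    · rw [count_bin_ones_from_zero_alt, if_neg (by omega)]
      set k : Nat := PySem.Int.bitLength n - 1 with hk
      show PySem.Int.floordiv ((k : Int) * 2 ^ k) 2 + (n - 2 ^ k + 1)
          + count_bin_ones_from_zero_alt (n - 2 ^ k) = pvS n
      have hble : 2 ^ k ≤ n.natAbs := PySem.Int.two_pow_bitLength_le n (by omega)
      have hblt : n.natAbs < 2 ^ (PySem.Int.bitLength n) := PySem.Int.lt_two_pow_bitLength n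
      have hbl1 : 1 ≤ PySem.Int.bitLength n := by
        by_contra hcon
        have h00 : PySem.Int.bitLength n = 0 := by omega
        rw [h00] at hblt
        omega
      have hkk : PySem.Int.bitLength n = k + 1 := by omega
      rw [hkk] at hblt
      have hple : (2:Int) ^ k ≤ n := by
        calc ((2:Int) ^ k) = ((2 ^ k : Nat) : Int) := by push_cast; ring
        _ ≤ (n.natAbs : Int) := by exact_mod_cast hble
        _ = n := by omega
      have hplt : n < 2 ^ k * 2 := by
        calc n = (n.natAbs : Int) := by omega
        _ < ((2 ^ (k + 1) : Nat) : Int) := by exact_mod_cast hblt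
        _ = 2 ^ k * 2 := by push_cast; ring
      have hppos : (0:Int) < 2 ^ k := by positivity
      have hdiv : PySem.Int.floordiv ((k : Int) * 2 ^ k) 2 = pvS (2 ^ k - 1) := by
        rw [PySem.Int.floordiv_eq_ediv_of_pos (by norm_num), ← pvS_pow k,
          Int.mul_ediv_cancel_left _ (by norm_num)]
      rw [hdiv, ih (n - 2 ^ k) (by omega) (by omega)]
      have hsplit := pvS_split k (n - 2 ^ k).toNat (n - 2 ^ k) le_rfl (by omega) (by omega)
      have : 2 ^ k + (n - 2 ^ k) = n := by ring
      rw [this] at hsplit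
      rw [hsplit]
    · have : n = 0 := by omega
      subst this
      rw [count_bin_ones_from_zero_alt, pvS_nonpos le_rfl]
      simp

-- ===== VERDICT (by name: the statement is the Claim_ definition above) =====
theorem count_bin_ones_from_zero_spec : Claim_equal_count_bin_ones_from_zero := by
  intro n hdom
  unfold Spec_count_bin_ones_from_zero
  have hb : -2147483648 ≤ n ∧ n ≤ 2147483648 := by
    have := hdom
    unfold Dom_count_bin_ones_from_zero pvDomInt at this
    exact of_decide_eq_true this
  by_cases hneg : n < 0
  · rw [count_bin_ones_from_zero, if_pos hneg,
      count_bin_ones_from_zero_alt, if_pos (by omega)]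
  · rw [pvA_eq_S n.toNat n le_rfl (by omega) (by omega),
      pvB_eq_S n.toNat n le_rfl (by omega)]
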